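-- pv_equiv track=rewrite | github.com/GuilhermeP96/pyaccelerate | src/pyaccelerate/gpu/detector.py | _vendor_from_name
-- ===== SOURCE A (Python) =====
-- from typing import Any, Dict, List, Optional, Tuple
--
-- def _vendor_from_name(name: str) -> Tuple[str, bool]:
--     """Guess vendor and discrete flag from device name string."""
--     nl = name.lower()
--     if any(k in nl for k in ("nvidia", "geforce", "rtx", "gtx", "quadro", "tesla", "a100", "h100")):
--         return "NVIDIA", True
--     if any(k in nl for k in ("radeon", "amd", "rx ", "vega", "instinct")):
--         return "AMD", True
--     if any(k in nl for k in ("intel", "uhd", "iris", "arc")):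
--         is_discrete = "arc" in nl
--         return "Intel", is_discrete
--     if any(k in nl for k in ("apple", "m1", "m2", "m3", "m4")):
--         return "Apple", True
--     # ARM mobile GPUs
--     if any(k in nl for k in ("adreno", "qualcomm")):
--         return "Qualcomm", False
--     if any(k in nl for k in ("mali", "immortalis")):
--         return "ARM", False
--     if any(k in nl for k in ("xclipse", "samsung gpu")):
--         return "Samsung", False
--     if any(k in nl for k in ("powervr", "imagination")):
--         return "Imagination", False
--     if any(k in nl for k in ("maleoon",)):
--         return "HiSilicon", False
--     # SBC / IoT GPUs
--     if any(k in nl for k in ("videocore", "vc4", "v3d")):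
--         return "Broadcom", False
--     if any(k in nl for k in ("tegra", "jetson")):
--         return "NVIDIA", False
--     if any(k in nl for k in ("vivante", "galcore", "gc7000", "gc nano")):
--         return "Vivante", False
--     return "unknown", False
-- ===== SOURCE B (Python) =====
-- _KEYWORD_PRIORITY = {
--     "nvidia": 0, "geforce": 0, "rtx": 0, "gtx": 0, "quadro": 0, "tesla": 0, "a100": 0, "h100": 0,
--     "radeon": 1, "amd": 1, "rx ": 1, "vega": 1, "instinct": 1,
--     "intel": 2, "uhd": 2, "iris": 2, "arc": 2,
--     "apple": 3, "m1": 3, "m2": 3, "m3": 3, "m4": 3,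
--     "adreno": 4, "qualcomm": 4,
--     "mali": 5, "immortalis": 5,
--     "xclipse": 6, "samsung gpu": 6,
--     "powervr": 7, "imagination": 7,
--     "maleoon": 8,
--     "videocore": 9, "vc4": 9, "v3d": 9,
--     "tegra": 10, "jetson": 10,
--     "vivante": 11, "galcore": 11, "gc7000": 11, "gc nano": 11,
-- }
-- _GROUPS = [
--     ("NVIDIA", True), ("AMD", True), ("Intel", False), ("Apple", True),
--     ("Qualcomm", False), ("ARM", False), ("Samsung", False), ("Imagination", False),
--     ("HiSilicon", False), ("Broadcom", False), ("NVIDIA", False), ("Vivante", False),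
-- ]
--
--
-- def _vendor_from_name(name: str):
--     """Collect every matching keyword's priority, then decide by the best (smallest) one."""
--     nl = name.lower()
--     hits = [p for k, p in _KEYWORD_PRIORITY.items() if k in nl]
--     if not hits:
--         return "unknown", False
--     p = min(hits)
--     vendor, discrete = _GROUPS[p]
--     if p == 2:  # Intel is discrete exactly for Arc parts
--         discrete = "arc" in nl
--     return vendor, discrete
-- ===== Notes on version B (the rewrite author's own statement) =====
-- stated objective: alternative
-- what changed: Instead of A's ordered early-return if-chain of group tests, B collects the priorities of ALL matching keywords from a flat keyword->priority dict in one comprehension, takes min(hits), and looks the winner up in a group table (Intel's discrete recomputed as 'arc' in nl).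
import Mathlib
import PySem

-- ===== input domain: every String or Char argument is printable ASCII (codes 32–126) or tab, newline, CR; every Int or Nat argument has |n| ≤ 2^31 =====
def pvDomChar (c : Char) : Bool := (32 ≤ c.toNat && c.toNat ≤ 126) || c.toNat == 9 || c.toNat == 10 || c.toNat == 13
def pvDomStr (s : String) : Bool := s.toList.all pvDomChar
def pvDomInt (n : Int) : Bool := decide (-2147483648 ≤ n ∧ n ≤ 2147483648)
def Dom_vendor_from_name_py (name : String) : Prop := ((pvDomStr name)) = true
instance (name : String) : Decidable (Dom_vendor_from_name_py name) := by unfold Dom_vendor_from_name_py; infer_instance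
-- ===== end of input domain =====

-- B replaces A's ordered early-return if-chain by collect-all-matching-keyword-priorities + min + table lookup (alternative decomposition, same cost).


-- ===== PORT A =====
def vendor_from_name_py (name : String) : String × Bool :=
  let nl := PySem.Str.lower name
  if ["nvidia", "geforce", "rtx", "gtx", "quadro", "tesla", "a100", "h100"].any (fun k => PySem.Str.isIn k nl) then ("NVIDIA", true)
  else if ["radeon", "amd", "rx ", "vega", "instinct"].any (fun k => PySem.Str.isIn k nl) then ("AMD", true)
  else if ["intel", "uhd", "iris", "arc"].any (fun k => PySem.Str.isIn k nl) then
    let is_discrete := PySem.Str.isIn "arc" nl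
    ("Intel", is_discrete)
  else if ["apple", "m1", "m2", "m3", "m4"].any (fun k => PySem.Str.isIn k nl) then ("Apple", true)
  else if ["adreno", "qualcomm"].any (fun k => PySem.Str.isIn k nl) then ("Qualcomm", false)
  else if ["mali", "immortalis"].any (fun k => PySem.Str.isIn k nl) then ("ARM", false)
  else if ["xclipse", "samsung gpu"].any (fun k => PySem.Str.isIn k nl) then ("Samsung", false)
  else if ["powervr", "imagination"].any (fun k => PySem.Str.isIn k nl) then ("Imagination", false)
  else if ["maleoon"].any (fun k => PySem.Str.isIn k nl) then ("HiSilicon", false)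
  else if ["videocore", "vc4", "v3d"].any (fun k => PySem.Str.isIn k nl) then ("Broadcom", false)
  else if ["tegra", "jetson"].any (fun k => PySem.Str.isIn k nl) then ("NVIDIA", false)
  else if ["vivante", "galcore", "gc7000", "gc nano"].any (fun k => PySem.Str.isIn k nl) then ("Vivante", false)
  else ("unknown", false)

-- ===== PORT B =====
-- flat keyword -> priority dict (association list, insertion order)
def pvKeywordPriority : List (String × Int) :=
  [("nvidia", 0), ("geforce", 0), ("rtx", 0), ("gtx", 0), ("quadro", 0), ("tesla", 0), ("a100", 0), ("h100", 0),
   ("radeon", 1), ("amd", 1), ("rx ", 1), ("vega", 1), ("instinct", 1),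
   ("intel", 2), ("uhd", 2), ("iris", 2), ("arc", 2),
   ("apple", 3), ("m1", 3), ("m2", 3), ("m3", 3), ("m4", 3),
   ("adreno", 4), ("qualcomm", 4),
   ("mali", 5), ("immortalis", 5),
   ("xclipse", 6), ("samsung gpu", 6),
   ("powervr", 7), ("imagination", 7),
   ("maleoon", 8),
   ("videocore", 9), ("vc4", 9), ("v3d", 9),
   ("tegra", 10), ("jetson", 10),
   ("vivante", 11), ("galcore", 11), ("gc7000", 11), ("gc nano", 11)]

def pvGroups : List (String × Bool) :=
  [("NVIDIA", true), ("AMD", true), ("Intel", false), ("Apple", true),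
   ("Qualcomm", false), ("ARM", false), ("Samsung", false), ("Imagination", false),
   ("HiSilicon", false), ("Broadcom", false), ("NVIDIA", false), ("Vivante", false)]

def vendor_from_name_py_alt (name : String) : String × Bool :=
  let nl := PySem.Str.lower name
  let hits := (pvKeywordPriority.filter (fun kp => PySem.Str.isIn kp.1 nl)).map Prod.snd
  match PySem.List.min? hits (fun x => x) with
  | none => ("unknown", false)
  | some p =>
    match PySem.List.pyGet? pvGroups p with
    | none => ("unknown", false)   -- unreachable: every priority is 0..11
    | some vd => (vd.1, if p = 2 then PySem.Str.isIn "arc" nl else vd.2)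

-- ===== PRECONDITION & SPEC =====
def Spec_vendor_from_name_py (name : String) (out : String × Bool) : Prop := out = vendor_from_name_py_alt name
instance (name : String) (out : String × Bool) : Decidable (Spec_vendor_from_name_py name out) := by unfold Spec_vendor_from_name_py; infer_instance

-- ===== CLAIM =====
def Claim_equal_vendor_from_name_py : Prop := ∀ (name : String), Dom_vendor_from_name_py name → Spec_vendor_from_name_py name (vendor_from_name_py name)

-- ===== LEMMAS AND PROOFS =====

-- A's groups, in order
def pvGroupKws : List (List String) :=
  [["nvidia", "geforce", "rtx", "gtx", "quadro", "tesla", "a100", "h100"],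
   ["radeon", "amd", "rx ", "vega", "instinct"],
   ["intel", "uhd", "iris", "arc"],
   ["apple", "m1", "m2", "m3", "m4"],
   ["adreno", "qualcomm"],
   ["mali", "immortalis"],
   ["xclipse", "samsung gpu"],
   ["powervr", "imagination"],
   ["maleoon"],
   ["videocore", "vc4", "v3d"],
   ["tegra", "jetson"],
   ["vivante", "galcore", "gc7000", "gc nano"]]

def pvPrior : Int → List (List String) → List (String × Int)
  | _, [] => []
  | i, g :: gs => g.map (fun k => (k, i)) ++ pvPrior (i + 1) gs

lemma pvKeywordPriority_eq : pvKeywordPriority = pvPrior 0 pvGroupKws := by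
  simp [pvKeywordPriority, pvGroupKws, pvPrior]

def pvFirstIdx (nl : String) : List (List String) → Option Int
  | [] => none
  | g :: gs => if g.any (fun k => PySem.Str.isIn k nl) then some 0 else (pvFirstIdx nl gs).map (· + 1)

lemma pvPrior_snd_ge (gs : List (List String)) : ∀ (i : Int), ∀ kp ∈ pvPrior i gs, i ≤ kp.2 := by
  induction gs with
  | nil => intro i kp h; simp [pvPrior] at h
  | cons g gs ih =>
    intro i kp h
    simp only [pvPrior, List.mem_append, List.mem_map] at h
    rcases h with ⟨k, _, rfl⟩ | h
    · exact le_refl i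
    · have := ih (i + 1) kp h; omega

lemma pvMinPrior (nl : String) (gs : List (List String)) : ∀ (i : Int),
    PySem.List.min? (((pvPrior i gs).filter (fun kp => PySem.Str.isIn kp.1 nl)).map Prod.snd) (fun x => x)
      = (pvFirstIdx nl gs).map (fun j => i + j) := by
  induction gs with
  | nil => intro i; simp [pvPrior, pvFirstIdx, PySem.List.min?]
  | cons g gs ih =>
    intro i
    by_cases hg : g.any (fun k => PySem.Str.isIn k nl)
    · -- some keyword of g matches; the minimum is i
      simp only [pvFirstIdx, hg, if_pos, Option.map_some]
      set L := ((pvPrior i (g :: gs)).filter (fun kp => PySem.Str.isIn kp.1 nl)).map Prod.snd with hL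
      have hmemL : ∀ x ∈ L, i ≤ x := by
        intro x hx
        rw [hL] at hx
        rcases List.mem_map.1 hx with ⟨kp, hkp, rfl⟩
        exact pvPrior_snd_ge _ i kp (List.mem_filter.1 hkp).1
      have hiL : (i : Int) ∈ L := by
        rcases List.any_eq_true.1 hg with ⟨k, hk, hkin⟩
        rw [hL]
        refine List.mem_map.2 ⟨(k, i), List.mem_filter.2 ⟨?_, hkin⟩, rfl⟩
        simp only [pvPrior, List.mem_append, List.mem_map]
        exact Or.inl ⟨k, hk, rfl⟩
      have hne : L ≠ [] := fun h => by simp [h] at hiL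
      rcases hm : PySem.List.min? L (fun x => x) with _ | m
      · exact absurd ((PySem.List.min?_eq_none_iff _ _).1 hm) hne
      · have h1 : m ∈ L := PySem.List.min?_mem hm
        have h2 : m ≤ i := PySem.List.min?_isMin hm i hiL
        have h3 : i ≤ m := hmemL m h1
        have : m = i := le_antisymm h2 h3
        simp [this]
    · -- no keyword of g matches: the g-part of the filter is empty
      have hfil : (g.map (fun k => (k, i))).filter (fun kp => PySem.Str.isIn kp.1 nl) = [] := by
        rw [List.filter_eq_nil_iff]
        intro kp hkp
        rcases List.mem_map.1 hkp with ⟨k, hk, rfl⟩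
        simp only []
        intro hc
        exact hg (List.any_eq_true.2 ⟨k, hk, hc⟩)
      have : ((pvPrior i (g :: gs)).filter (fun kp => PySem.Str.isIn kp.1 nl)).map Prod.snd
          = ((pvPrior (i + 1) gs).filter (fun kp => PySem.Str.isIn kp.1 nl)).map Prod.snd := by
        simp only [pvPrior, List.filter_append, hfil, List.nil_append]
      rw [this, ih (i + 1)]
      simp only [pvFirstIdx, hg, if_neg, Bool.false_eq_true, not_false_iff]
      cases pvFirstIdx nl gs with
      | none => simp
      | some j => simp; omega

-- ===== VERDICT =====
theorem vendor_from_name_py_spec : Claim_equal_vendor_from_name_py := by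
  intro name _
  show vendor_from_name_py name = vendor_from_name_py_alt name
  simp only [vendor_from_name_py, vendor_from_name_py_alt, pvKeywordPriority_eq]
  rw [pvMinPrior]
  simp only [pvGroupKws, pvFirstIdx]
  generalize (PySem.Str.isIn "arc" (PySem.Str.lower name)) = barc
  generalize (List.any ["nvidia", "geforce", "rtx", "gtx", "quadro", "tesla", "a100", "h100"] fun k => PySem.Str.isIn k (PySem.Str.lower name)) = c0
  generalize (List.any ["radeon", "amd", "rx ", "vega", "instinct"] fun k => PySem.Str.isIn k (PySem.Str.lower name)) = c1
  generalize (List.any ["intel", "uhd", "iris", "arc"] fun k => PySem.Str.isIn k (PySem.Str.lower name)) = c2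
  generalize (List.any ["apple", "m1", "m2", "m3", "m4"] fun k => PySem.Str.isIn k (PySem.Str.lower name)) = c3
  generalize (List.any ["adreno", "qualcomm"] fun k => PySem.Str.isIn k (PySem.Str.lower name)) = c4
  generalize (List.any ["mali", "immortalis"] fun k => PySem.Str.isIn k (PySem.Str.lower name)) = c5
  generalize (List.any ["xclipse", "samsung gpu"] fun k => PySem.Str.isIn k (PySem.Str.lower name)) = c6
  generalize (List.any ["powervr", "imagination"] fun k => PySem.Str.isIn k (PySem.Str.lower name)) = c7
  generalize (List.any ["maleoon"] fun k => PySem.Str.isIn k (PySem.Str.lower name)) = c8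
  generalize (List.any ["videocore", "vc4", "v3d"] fun k => PySem.Str.isIn k (PySem.Str.lower name)) = c9
  generalize (List.any ["tegra", "jetson"] fun k => PySem.Str.isIn k (PySem.Str.lower name)) = c10
  generalize (List.any ["vivante", "galcore", "gc7000", "gc nano"] fun k => PySem.Str.isIn k (PySem.Str.lower name)) = c11
  revert barc c0 c1 c2 c3 c4 c5 c6 c7 c8 c9 c10 c11
  decide
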